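-- pv_equiv track=rewrite | github.com/hakataramen/kakoubunsyo | prepro2.py | get_index_dic
-- ===== SOURCE A (Python) =====
-- from collections import OrderedDict
--
-- def get_index_dic(sents_list):
--     idx_dic = OrderedDict()
--
--     i = len(idx_dic)+1
--     for line in sents_list:#一文
--         for word in line:
--             if not word in idx_dic:
--                 idx_dic[word] = i
--                 i += 1
--     return idx_dic
-- ===== SOURCE B (Python) =====
-- from collections import OrderedDict
--
-- def get_index_dic(sents_list):
--     flat = [w for line in sents_list for w in line]
--     first = {}
--     for pos, word in reversed(list(enumerate(flat))):
--         first[word] = pos  # last write wins: descending positions leave the FIRST occurrence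
--     idx_dic = OrderedDict()
--     for i, (word, _) in enumerate(sorted(first.items(), key=lambda kv: kv[1]), 1):
--         idx_dic[word] = i
--     return idx_dic
-- ===== Notes on version B (the rewrite author's own statement) =====
-- stated objective: alternative
-- what changed: Replaced the membership-guarded incremental-counter pass by a different algorithm: a reverse sweep with unconditional dict overwrite computes each word's first-occurrence position (no membership test), then the (word, position) pairs are sorted by position and numbered from 1.
import Mathlib
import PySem

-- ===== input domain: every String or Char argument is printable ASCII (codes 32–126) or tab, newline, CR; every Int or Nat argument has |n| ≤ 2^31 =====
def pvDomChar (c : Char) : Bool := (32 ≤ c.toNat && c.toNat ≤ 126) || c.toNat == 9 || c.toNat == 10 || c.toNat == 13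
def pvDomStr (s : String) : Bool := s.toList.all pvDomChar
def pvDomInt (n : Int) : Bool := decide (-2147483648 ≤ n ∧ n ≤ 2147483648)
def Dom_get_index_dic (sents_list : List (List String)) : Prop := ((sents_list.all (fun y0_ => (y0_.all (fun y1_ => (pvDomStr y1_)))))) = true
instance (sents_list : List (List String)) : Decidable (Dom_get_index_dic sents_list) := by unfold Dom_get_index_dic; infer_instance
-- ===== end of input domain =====

-- B uses a different algorithm (reverse overwrite pass computing first positions, then sort by position and number); same return value.

-- ===== PORT A =====
-- A's inner loop body: if word not yet a key, idx_dic[word] = i; i += 1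
def getIndexStep (st : PySem.Dict String Int × Int) (word : String) :
    PySem.Dict String Int × Int :=
  if st.1.contains word then st else (st.1.insert word st.2, st.2 + 1)

def get_index_dic (sents_list : List (List String)) : List (String × Int) :=
  let init : PySem.Dict String Int × Int := (PySem.Dict.empty, (PySem.Dict.empty : PySem.Dict String Int).size + 1)
  let fin := sents_list.foldl (fun st line => line.foldl getIndexStep st) init
  fin.1.items

-- ===== PORT B =====
def get_index_dic_alt (sents_list : List (List String)) : List (String × Int) :=
  let flat := sents_list.flatMap (fun line => line)
  -- for pos, word in reversed(list(enumerate(flat))): first[word] = pos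
  let first := ((PySem.List.enumerate flat 0).reverse).foldl
      (fun d pw => d.insert pw.2 pw.1) (PySem.Dict.empty : PySem.Dict String Int)
  -- sorted(first.items(), key=lambda kv: kv[1])
  let ordered := PySem.List.sorted first.items (fun kv => kv.2)
  -- for i, (word, _) in enumerate(sorted(...), 1): idx_dic[word] = i
  ((PySem.List.enumerate ordered 1).foldl
      (fun d p => d.insert p.2.1 p.1) (PySem.Dict.empty : PySem.Dict String Int)).items

-- ===== PRECONDITION & SPEC =====
def Spec_get_index_dic (sents_list : List (List String)) (out : List (String × Int)) : Prop := out = get_index_dic_alt sents_list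
instance (sents_list : List (List String)) (out : List (String × Int)) : Decidable (Spec_get_index_dic sents_list out) := by unfold Spec_get_index_dic; infer_instance

-- ===== CLAIM (what is proved, stated in full; the proofs are below) =====
def Claim_equal_get_index_dic : Prop := ∀ (sents_list : List (List String)), Dom_get_index_dic sents_list → Spec_get_index_dic sents_list (get_index_dic sents_list)

-- ===== LEMMAS AND PROOFS =====

-- the (word, index) pairs for a fully-processed word list acc, indices starting at s
def pvPairsOf (acc : List String) (s : Int) : List (String × Int) :=
  (PySem.List.enumerate acc s).map (fun p => (p.2, p.1))

def pvDictOf (acc : List String) : PySem.Dict String Int :=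
  PySem.Dict.mk (pvPairsOf acc 1)

lemma pvPairsOf_append_singleton (acc : List String) (w : String) (s : Int) :
    pvPairsOf (acc ++ [w]) s = pvPairsOf acc s ++ [(w, s + acc.length)] := by
  simp [pvPairsOf, PySem.List.enumerate_append, PySem.List.enumerate_cons,
    PySem.List.enumerate_nil]

lemma pvDictOf_keys (acc : List String) : (pvDictOf acc).keys = acc := by
  simp [pvDictOf, PySem.Dict.keys_mk, pvPairsOf, List.map_map, Function.comp_def,
    PySem.List.map_snd_enumerate]

lemma pvDictOf_contains (acc : List String) (w : String) :
    (pvDictOf acc).contains w = decide (w ∈ acc) := by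
  rw [PySem.Dict.contains_eq_decide_mem_keys, pvDictOf_keys]

-- A's interleaved loop over any word list equals the dedupe of that list
lemma pvStep_invariant (ws acc : List String) :
    ws.foldl getIndexStep (pvDictOf acc, (acc.length : Int) + 1)
      = (pvDictOf (PySem.Set.update acc ws), ((PySem.Set.update acc ws).length : Int) + 1) := by
  induction ws generalizing acc with
  | nil => simp [PySem.Set.update]
  | cons w ws ih =>
    simp only [List.foldl_cons]
    by_cases hmem : w ∈ acc
    · have hc : getIndexStep (pvDictOf acc, (acc.length : Int) + 1) w
          = (pvDictOf acc, (acc.length : Int) + 1) := by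
        simp [getIndexStep, pvDictOf_contains, hmem]
      have hadd : PySem.Set.add acc w = acc := by
        simp [PySem.Set.add, PySem.Set.contains, hmem]
      rw [hc, ih acc]
      simp [PySem.Set.update, hadd]
    · have hc : (pvDictOf acc).contains w = false := by
        simp [pvDictOf_contains, hmem]
      have hins : (pvDictOf acc).insert w ((acc.length : Int) + 1) = pvDictOf (acc ++ [w]) := by
        apply PySem.Dict.ext
        rw [PySem.Dict.items_insert_of_not_contains _ _ hc]
        simp [pvDictOf, pvPairsOf_append_singleton]
        omega
      have hadd : PySem.Set.add acc w = acc ++ [w] := by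
        simp [PySem.Set.add, PySem.Set.contains, hmem]
      have hlen : ((acc.length : Int) + 1) + 1 = ((acc ++ [w]).length : Int) + 1 := by
        simp
      rw [show getIndexStep (pvDictOf acc, (acc.length : Int) + 1) w
          = (pvDictOf (acc ++ [w]), ((acc ++ [w]).length : Int) + 1) by
        simp [getIndexStep, hc, hins, hlen]]
      rw [ih (acc ++ [w])]
      simp [PySem.Set.update, hadd]

-- the nested for-loops are one loop over the flattened word list
lemma pvFoldl_flatMap (sents : List (List String)) (init : PySem.Dict String Int × Int) :
    sents.foldl (fun st line => line.foldl getIndexStep st) init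
      = (sents.flatMap (fun l => l)).foldl getIndexStep init := by
  induction sents generalizing init with
  | nil => simp
  | cons l ls ih => simp [List.foldl_append, ih]

-- A's result: the dedupe of the flattened words, numbered from 1
lemma pvA_items (sents : List (List String)) :
    get_index_dic sents = pvPairsOf (PySem.Set.ofList (sents.flatMap (fun l => l))) 1 := by
  unfold get_index_dic
  simp only []
  rw [pvFoldl_flatMap]
  have h0 : ((PySem.Dict.empty : PySem.Dict String Int), ((PySem.Dict.empty : PySem.Dict String Int).size : Int) + 1)
      = (pvDictOf [], (([] : List String).length : Int) + 1) := by
    apply Prod.ext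
    · apply PySem.Dict.ext
      simp [pvDictOf, pvPairsOf, PySem.List.enumerate_nil, PySem.Dict.empty]
    · simp [PySem.Dict.empty, PySem.Dict.size]
  rw [h0, pvStep_invariant]
  simp [PySem.Set.update, PySem.Set.ofList_eq_foldl, pvDictOf]

-- ---------- B side ----------

-- Set.update appends the fresh elements of the dedupe, in order
lemma pvUpdate_eq_append_filter (xs s : List String) :
    PySem.Set.update s xs
      = s ++ (PySem.Set.ofList xs).filter (fun y => !decide (y ∈ s)) := by
  induction xs generalizing s with
  | nil => simp [PySem.Set.update, PySem.Set.ofList]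
  | cons x xs ih =>
    have hupd : ∀ t : List String, PySem.Set.update t (x :: xs) = PySem.Set.update (PySem.Set.add t x) xs := by
      intro t; simp [PySem.Set.update]
    have hof : PySem.Set.ofList (x :: xs) = PySem.Set.update [x] xs := by
      simp [PySem.Set.ofList_eq_foldl, PySem.Set.update, PySem.Set.add, PySem.Set.contains]
    rw [hupd, ih, hof, ih]
    by_cases hx : x ∈ s
    · have h1 : PySem.Set.add s x = s := by simp [PySem.Set.add, PySem.Set.contains, hx]
      rw [h1]
      simp only [List.filter_append, List.filter_filter]
      congr 1
      rw [show List.filter (fun y => !decide (y ∈ s)) [x] = [] from by simp [hx],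
        List.nil_append]
      apply List.filter_congr
      intro y _
      by_cases hy : y ∈ s
      · simp [hy]
      · have : ¬ y ∈ [x] := by
          simp only [List.mem_singleton]
          exact fun h => hy (h ▸ hx)
        simp [hy, this]
    · have h1 : PySem.Set.add s x = s ++ [x] := by simp [PySem.Set.add, PySem.Set.contains, hx]
      rw [h1]
      simp only [List.filter_append, List.filter_filter, List.append_assoc]
      congr 1
      rw [show List.filter (fun y => !decide (y ∈ s)) [x] = [x] from by simp [hx]]
      congr 1
      apply List.filter_congr
      intro y _
      by_cases hyx : y = x
      · subst hyx; simp
      · by_cases hy : y ∈ s <;> simp [hy, hyx]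

lemma pvOfList_cons (x : String) (xs : List String) :
    PySem.Set.ofList (x :: xs)
      = x :: (PySem.Set.ofList xs).filter (fun y => !decide (y = x)) := by
  have hof : PySem.Set.ofList (x :: xs) = PySem.Set.update [x] xs := by
    simp [PySem.Set.ofList_eq_foldl, PySem.Set.update, PySem.Set.add, PySem.Set.contains]
  rw [hof, pvUpdate_eq_append_filter]
  simp

-- along the dedupe, first-occurrence indices strictly increase
lemma pvDedup_pairwise_idxOf (l : List String) :
    List.Pairwise (fun a b => l.idxOf a < l.idxOf b) (PySem.Set.ofList l) := by
  induction l with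
  | nil => simp [PySem.Set.ofList]
  | cons x xs ih =>
    rw [pvOfList_cons]
    constructor
    · intro b hb
      have hbx : b ≠ x := by
        have := (List.mem_filter.mp hb).2
        simpa using this
      rw [List.idxOf_cons_self, List.idxOf_cons_ne xs (Ne.symm hbx)]
      omega
    · have hsub : ((PySem.Set.ofList xs).filter (fun y => !decide (y = x))).Sublist (PySem.Set.ofList xs) :=
        List.filter_sublist
      have hp := List.Pairwise.sublist hsub ih
      apply hp.imp_of_mem
      intro a b ha hb hab
      have hax : a ≠ x := by have := (List.mem_filter.mp ha).2; simpa using this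
      have hbx : b ≠ x := by have := (List.mem_filter.mp hb).2; simpa using this
      rw [List.idxOf_cons_ne xs (Ne.symm hax), List.idxOf_cons_ne xs (Ne.symm hbx)]
      omega

-- B's reverse overwrite pass, as structural recursion on the word list
def pvFirstDict (ws : List String) (s : Int) : PySem.Dict String Int :=
  ((PySem.List.enumerate ws s).reverse).foldl
    (fun d pw => d.insert pw.2 pw.1) (PySem.Dict.empty : PySem.Dict String Int)

lemma pvFirstDict_cons (w : String) (ws : List String) (s : Int) :
    pvFirstDict (w :: ws) s = (pvFirstDict ws (s + 1)).insert w s := by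
  unfold pvFirstDict
  rw [PySem.List.enumerate_cons, List.reverse_cons, List.foldl_append]
  rfl

lemma pvFirstDict_mem_keys (ws : List String) (s : Int) (a : String) :
    a ∈ (pvFirstDict ws s).keys ↔ a ∈ ws := by
  induction ws generalizing s with
  | nil => simp [pvFirstDict, PySem.List.enumerate_nil, PySem.Dict.empty]
  | cons w ws ih =>
    rw [pvFirstDict_cons, PySem.Dict.mem_keys_insert]
    simp [ih]

lemma pvFirstDict_nodup_keys (ws : List String) (s : Int) :
    (pvFirstDict ws s).keys.Nodup := by
  induction ws generalizing s with
  | nil => simp [pvFirstDict, PySem.List.enumerate_nil, PySem.Dict.empty]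
  | cons w ws ih =>
    rw [pvFirstDict_cons]
    exact PySem.Dict.nodup_keys_insert _ _ _ (ih (s + 1))

-- last write wins: the descending pass leaves each word's FIRST position
lemma pvFirstDict_getD (ws : List String) (s : Int) (w : String) (h : w ∈ ws) :
    (pvFirstDict ws s).getD w 0 = s + (ws.idxOf w : Int) := by
  induction ws generalizing s with
  | nil => simp at h
  | cons w0 ws ih =>
    rw [pvFirstDict_cons]
    by_cases hw : w = w0
    · subst hw
      rw [PySem.Dict.getD_insert_self, List.idxOf_cons_self]
      simp
    · rw [PySem.Dict.getD_insert_of_ne _ _ _ hw]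
      have hmem : w ∈ ws := by
        rcases List.mem_cons.mp h with h1 | h1
        · exact absurd h1 hw
        · exact h1
      rw [ih (s + 1) hmem, List.idxOf_cons_ne ws (Ne.symm hw)]
      push_cast
      ring

-- sorting the items of the reverse pass by position gives the dedupe with its first positions
lemma pvSorted_items (ws : List String) :
    PySem.List.sorted (pvFirstDict ws 0).items (fun kv => kv.2)
      = (PySem.Set.ofList ws).map (fun w => (w, (ws.idxOf w : Int))) := by
  apply PySem.List.sorted_eq_of_perm_of_pairwise_lt
  · have hitems : (pvFirstDict ws 0).items
        = (pvFirstDict ws 0).keys.map (fun k => (k, (pvFirstDict ws 0).getD k 0)) :=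
      PySem.Dict.items_eq_map_keys _ (pvFirstDict_nodup_keys ws 0) 0
    have hkeysperm : (pvFirstDict ws 0).keys.Perm (PySem.Set.ofList ws) := by
      rw [List.perm_ext_iff_of_nodup (pvFirstDict_nodup_keys ws 0) (PySem.Set.nodup_ofList ws)]
      intro a
      rw [pvFirstDict_mem_keys, PySem.Set.mem_ofList]
    have hmap : (PySem.Set.ofList ws).map (fun k => (k, (pvFirstDict ws 0).getD k 0))
        = (PySem.Set.ofList ws).map (fun w => (w, (ws.idxOf w : Int))) := by
      apply List.map_congr_left
      intro k hk
      have hkws : k ∈ ws := (PySem.Set.mem_ofList ws k).mp hk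
      rw [pvFirstDict_getD ws 0 k hkws]
      simp
    rw [← hmap, hitems]
    exact (hkeysperm.map _).symm
  · rw [List.pairwise_map]
    apply (pvDedup_pairwise_idxOf ws).imp
    intro a b hab
    simpa using (Int.ofNat_lt.mpr hab)

-- enumerate of a mapped list keeps the indices and maps the elements
lemma pvEnumerate_map {β : Type} (l : List String) (f : String → β) (s : Int) :
    PySem.List.enumerate (l.map f) s = (PySem.List.enumerate l s).map (fun p => (p.1, f p.2)) := by
  induction l generalizing s with
  | nil => simp [PySem.List.enumerate_nil]
  | cons x xs ih => simp [PySem.List.enumerate_cons, ih]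

-- B's result: the same dedupe of the flattened words, numbered from 1
lemma pvB_items (sents : List (List String)) :
    get_index_dic_alt sents = pvPairsOf (PySem.Set.ofList (sents.flatMap (fun l => l))) 1 := by
  unfold get_index_dic_alt
  simp only []
  have hfirst : ((PySem.List.enumerate (sents.flatMap (fun l => l)) 0).reverse).foldl
      (fun d pw => d.insert pw.2 pw.1) (PySem.Dict.empty : PySem.Dict String Int)
      = pvFirstDict (sents.flatMap (fun l => l)) 0 := rfl
  rw [hfirst, pvSorted_items]
  have hTmap : PySem.List.enumerate
        ((PySem.Set.ofList (sents.flatMap (fun l => l))).map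
          (fun w => (w, ((sents.flatMap (fun l => l)).idxOf w : Int)))) 1
      = (PySem.List.enumerate (PySem.Set.ofList (sents.flatMap (fun l => l))) 1).map
          (fun p => (p.1, (p.2, ((sents.flatMap (fun l => l)).idxOf p.2 : Int)))) :=
    pvEnumerate_map _ _ 1
  rw [hTmap]
  have hfold := PySem.Dict.items_foldl_insert_fresh
    ((PySem.List.enumerate (PySem.Set.ofList (sents.flatMap (fun l => l))) 1).map
        (fun p => (p.1, (p.2, ((sents.flatMap (fun l => l)).idxOf p.2 : Int)))))
    (fun p => p.2.1) (fun p => p.1) (PySem.Dict.empty : PySem.Dict String Int)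
    (by intro a _; simp [PySem.Dict.contains_empty])
    (by
      rw [List.map_map]
      have : ((fun (p : Int × (String × Int)) => p.2.1) ∘
          (fun p => (p.1, (p.2, ((sents.flatMap (fun l => l)).idxOf p.2 : Int)))))
          = fun (p : Int × String) => p.2 := rfl
      rw [this, PySem.List.map_snd_enumerate]
      exact PySem.Set.nodup_ofList _)
  simp only [] at hfold
  rw [hfold, List.map_map]
  simp [pvPairsOf, PySem.Dict.empty, Function.comp_def]

-- ===== VERDICT (by name: the statement is the Claim_ definition above) =====
theorem get_index_dic_spec : Claim_equal_get_index_dic := by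
  intro sents _
  unfold Spec_get_index_dic
  rw [pvA_items, pvB_items]
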